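-- pv_equiv track=rewrite | github.com/Nirjal22/FOCP | week6/week6Programs/num4.py | entered_str
-- ===== SOURCE A (Python) =====
-- def entered_str(values):
--     b = []
--     for i in values:
--         b.append(i)
--     c = b[::-1]
--     d = ' '.join(c)
--     e = d.replace(" ","")
--     return e
-- ===== SOURCE B (Python) =====
-- def entered_str(values):
--     chars = []
--     for i in range(len(values) - 1, -1, -1):
--         for ch in values[i]:
--             if ch != ' ':
--                 chars.append(ch)
--     return ''.join(chars)
-- ===== Notes on version B (the rewrite author's own statement) =====
-- stated objective: alternative
-- what changed: B drops A's copy / reverse-slice / join-with-spaces / delete-all-spaces pipeline for a single fused pass: a descending index loop over the elements with per-character filtering into one accumulator, joined once at the end.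
import Mathlib
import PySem

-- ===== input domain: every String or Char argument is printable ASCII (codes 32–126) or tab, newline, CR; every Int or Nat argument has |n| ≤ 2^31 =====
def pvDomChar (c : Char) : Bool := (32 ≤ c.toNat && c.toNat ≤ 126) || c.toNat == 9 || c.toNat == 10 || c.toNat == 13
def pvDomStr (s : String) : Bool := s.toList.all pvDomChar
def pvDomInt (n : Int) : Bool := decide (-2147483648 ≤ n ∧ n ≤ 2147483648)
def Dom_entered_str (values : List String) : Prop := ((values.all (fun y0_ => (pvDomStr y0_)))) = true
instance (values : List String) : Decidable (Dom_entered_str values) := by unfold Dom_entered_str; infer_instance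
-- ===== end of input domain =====

-- B drops A's copy / reverse-slice / join-with-spaces / delete-all-spaces pipeline: one fused
-- descending-index pass over the elements with per-character space filtering into a single
-- accumulator, joined once at the end (alternative).

-- ===== PORT A =====
def entered_str (values : List String) : String :=
  let b := values.foldl (fun acc i => acc ++ [i]) ([] : List String)
  -- b[::-1]; Python slicing with step -1 never raises, so the none branch is unreachable
  let c := (PySem.List.slice? b none none (-1)).getD []
  let d := PySem.Str.join " " c
  let e := PySem.Str.replace d " " ""
  e

-- ===== PORT B =====
-- the accumulator of appended characters is a List Char, joined by String.ofList at the end;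
-- values[i] is PySem.List.pyGet?; the loop index i is always in range, so getD "" is never taken
def entered_str_alt (values : List String) : String :=
  String.ofList ((PySem.List.pyRange ((values.length : Int) - 1) (-1) (-1)).foldl
    (fun chars i =>
      ((PySem.List.pyGet? values i).getD "").toList.foldl
        (fun cs ch => if ch ≠ ' ' then cs ++ [ch] else cs) chars)
    [])

-- ===== PRECONDITION & SPEC =====
def Spec_entered_str (values : List String) (out : String) : Prop := out = entered_str_alt values
instance (values : List String) (out : String) : Decidable (Spec_entered_str values out) := by unfold Spec_entered_str; infer_instance

-- ===== CLAIM (what is proved, stated in full; the proofs are below) =====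
def Claim_equal_entered_str : Prop := ∀ (values : List String), Dom_entered_str values → Spec_entered_str values (entered_str values)

-- ===== LEMMAS AND PROOFS =====

-- replace.go with old = [' '], new = [] just filters out spaces
theorem pv_go_space (fuel : Nat) (l acc : List Char) (h : l.length ≤ fuel) :
    PySem.Chars.replace.go [' '] [] fuel l acc = acc.reverse ++ l.filter (· != ' ') := by
  induction fuel generalizing l acc with
  | zero =>
    have : l = [] := List.length_eq_zero_iff.mp (Nat.le_zero.mp h)
    subst this; simp [PySem.Chars.replace.go]
  | succ n ih =>
    cases l with
    | nil => simp [PySem.Chars.replace.go]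
    | cons c t =>
      have hcond : List.isPrefixOf [' '] (c::t) = (c == ' ') := by
        simp [List.isPrefixOf, eq_comm]
      have ht : t.length ≤ n := by simpa using h
      simp only [PySem.Chars.replace.go, hcond]
      by_cases hc : c = ' '
      · subst hc
        rw [if_pos (show ((' ' == ' ') = true) by decide),
          show List.drop [' '].length (' '::t) = t from rfl,
          show ([]:List Char).reverse ++ acc = acc from rfl, ih t acc ht]
        simp
      · rw [if_neg (by simp [hc]), ih t (c :: acc) ht]
        simp [hc]

theorem pv_replace_space (s : List Char) :
    PySem.Chars.replace s [' '] [] = s.filter (· != ' ') := by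
  rw [PySem.Chars.replace, if_neg (by decide)]
  exact pv_go_space s.length s [] (le_refl _)

-- filtering out the separator from an intercalation concatenates the filtered parts
theorem pv_filter_intercalate (parts : List (List Char)) :
    (List.intercalate [' '] parts).filter (· != ' ') =
      (parts.map (fun p => p.filter (· != ' '))).flatten := by
  induction parts with
  | nil => simp [List.intercalate]
  | cons p ps ih =>
    cases ps with
    | nil => simp [List.intercalate]
    | cons q qs =>
      have h : List.intercalate [' '] (p :: q :: qs) = p ++ [' '] ++ List.intercalate [' '] (q :: qs) := by
        simp [List.intercalate, List.intersperse]
      rw [h]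
      simp only [List.filter_append, ih]
      simp

-- an append loop collects exactly the images of its input list
theorem pv_foldl_append {α β : Type} (f : α → β) (l : List α) (acc : List β) :
    l.foldl (fun a i => a ++ [f i]) acc = acc ++ l.map f := by
  induction l generalizing acc with
  | nil => simp
  | cons x xs ih => simp [List.foldl, ih]

-- B's inner character loop is a filter
theorem pv_inner_filter (l acc : List Char) :
    l.foldl (fun kept ch => if ch ≠ ' ' then kept ++ [ch] else kept) acc
      = acc ++ l.filter (· != ' ') := by
  induction l generalizing acc with
  | nil => simp
  | cons c t ih =>
    simp only [List.foldl]
    by_cases hc : c = ' '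
    · rw [show (if c ≠ ' ' then acc ++ [c] else acc) = acc from by simp [hc], ih]
      simp [hc]
    · rw [show (if c ≠ ' ' then acc ++ [c] else acc) = acc ++ [c] from by simp [hc], ih]
      simp [hc]

-- B's descending index loop flattens the filtered elements in reversed order
theorem pv_range_fold (values : List String) (n : Nat) (hn : n ≤ values.length) (acc : List Char) :
    (PySem.List.pyRange ((n : Int) - 1) (-1) (-1)).foldl
        (fun chars i =>
          ((PySem.List.pyGet? values i).getD "").toList.foldl
            (fun cs ch => if ch ≠ ' ' then cs ++ [ch] else cs) chars)
        acc
      = acc ++ ((values.take n).reverse.map (fun s => s.toList.filter (· != ' '))).flatten := by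
  induction n generalizing acc with
  | zero =>
    rw [show ((0 : Nat) : Int) - 1 = -1 from rfl,
      PySem.List.pyRange_neg_one_eq_nil (le_refl (-1))]
    simp
  | succ n ih =>
    have hcons : PySem.List.pyRange (((n + 1 : Nat) : Int) - 1) (-1) (-1)
        = ((n : Nat) : Int) :: PySem.List.pyRange (((n : Nat) : Int) - 1) (-1) (-1) := by
      rw [show (((n + 1 : Nat) : Int) - 1) = ((n : Nat) : Int) by push_cast; ring]
      exact PySem.List.pyRange_neg_one_cons (by omega)
    have hlt : n < values.length := hn
    rw [hcons, List.foldl_cons, PySem.List.pyGet?_natCast,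
      List.getElem?_eq_getElem hlt, Option.getD_some, pv_inner_filter,
      ih (Nat.le_of_lt hlt), List.take_add_one, List.getElem?_eq_getElem hlt]
    simp
    rw [show List.take (n+1) (List.map (fun s : String => List.filter (fun x => x != ' ') s.toList) values)
          = List.take n (List.map (fun s : String => List.filter (fun x => x != ' ') s.toList) values)
            ++ [List.filter (fun x => x != ' ') values[n].toList] from by
        rw [List.take_add_one, List.getElem?_map, List.getElem?_eq_getElem hlt]; rfl]
    simp

-- ===== VERDICT (by name: the statement is the Claim_ definition above) =====
theorem entered_str_spec : Claim_equal_entered_str := by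
  intro values _
  unfold Spec_entered_str entered_str
  apply String.toList_inj.mp
  show (PySem.Str.replace (PySem.Str.join " " ((PySem.List.slice? (values.foldl (fun acc i => acc ++ [i]) ([] : List String)) none none (-1)).getD [])) " " "").toList = _
  rw [show List.foldl (fun (acc : List String) i => acc ++ [i]) [] values = values from by
        simpa using pv_foldl_append id values [],
      PySem.List.slice?_none_none_neg_one, Option.getD_some]
  rw [PySem.Str.toList_replace, PySem.Str.toList_join]
  have hjoin : PySem.Chars.join " ".toList (List.map String.toList values.reverse)
      = List.intercalate [' '] (List.map String.toList values.reverse) := rfl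
  rw [hjoin, show (" ".toList : List Char) = [' '] from rfl,
      show ("".toList : List Char) = [] from rfl,
      pv_replace_space, pv_filter_intercalate]
  show _ = (String.ofList _).toList
  rw [pv_range_fold values values.length (le_refl _) [], List.take_length,
    String.toList_ofList]
  simp [List.map_map, Function.comp_def]
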